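-- pv_equiv track=rewrite | github.com/Eduard951/ncid | cipherTypeDetection/textLine2CipherStatisticsDataset.py | patternRepetitions
-- ===== SOURCE A (Python) =====
-- def patternRepetitions(text):
--     counter = 0
--     for step in 3, 5, 7, 11, 13:
--         # 3 pattern repitions
--         for position in range(0, len(text) - 3, step):
--             p1_0, p1_1, p1_2 = text[position], text[position + 1], text[position + 2]
--             for position2 in range(position + step, len(text) - 3, step):
--                 p2_0, p2_1, p2_2 = text[position2], text[position2 + 1], text[position2 + 2]
--                 if p1_0 == p2_0 and p1_1 == p2_1 and p1_2 == p2_2: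
--                     counter = counter + 1
--     return counter
-- ===== SOURCE B (Python) =====
-- def patternRepetitions(text):
--     n = len(text)
--     total = 0
--     for step in (3, 5, 7, 11, 13):
--         seen = {}
--         pairs = 0
--         for pos in range(0, n - 3, step):
--             g = (text[pos], text[pos + 1], text[pos + 2])
--             c = seen.get(g, 0)
--             pairs += c
--             seen[g] = c + 1
--         total += pairs
--     return total
-- ===== Notes on version B (the rewrite author's own statement) =====
-- stated objective: faster
-- what changed: Replaces the quadratic pairwise comparison of strided 3-grams with a single pass per step that keeps a running dict of 3-gram counts and accumulates, for each position, the number of earlier equal 3-grams.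
import Mathlib
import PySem

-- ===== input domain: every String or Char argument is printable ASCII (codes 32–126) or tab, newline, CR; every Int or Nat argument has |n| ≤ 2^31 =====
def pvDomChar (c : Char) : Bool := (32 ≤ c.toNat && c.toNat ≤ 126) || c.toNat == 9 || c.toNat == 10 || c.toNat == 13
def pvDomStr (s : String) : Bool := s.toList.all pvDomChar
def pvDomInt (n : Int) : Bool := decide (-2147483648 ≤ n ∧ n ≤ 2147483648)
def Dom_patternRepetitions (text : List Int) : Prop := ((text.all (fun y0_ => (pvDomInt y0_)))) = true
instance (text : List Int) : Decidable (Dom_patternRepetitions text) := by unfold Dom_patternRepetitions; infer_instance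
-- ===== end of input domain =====

-- B replaces A's quadratic pairwise scan of strided 3-grams by one pass per step with a
-- running dict of 3-gram counts (objective: faster; equivalence of return values is proved below).

-- ===== PORT A =====
-- All indices used are in range (0 ≤ position and position + 2 < len text), so pyGetD is exact here.
def patternRepetitions (text : List Int) : Int :=
  [(3 : Int), 5, 7, 11, 13].foldl (fun counter step =>
    (PySem.List.pyRange 0 ((text.length : Int) - 3) step).foldl (fun counter position =>
      let p1_0 := PySem.List.pyGetD text position 0
      let p1_1 := PySem.List.pyGetD text (position + 1) 0
      let p1_2 := PySem.List.pyGetD text (position + 2) 0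
      (PySem.List.pyRange (position + step) ((text.length : Int) - 3) step).foldl
        (fun counter position2 =>
          let p2_0 := PySem.List.pyGetD text position2 0
          let p2_1 := PySem.List.pyGetD text (position2 + 1) 0
          let p2_2 := PySem.List.pyGetD text (position2 + 2) 0
          if p1_0 == p2_0 && p1_1 == p2_1 && p1_2 == p2_2 then counter + 1 else counter)
        counter)
      counter)
    0

-- ===== PORT B =====
-- one loop body of Source B: read the running count of the 3-gram, add it to pairs, bump the dict
def pvBStep (st : PySem.Dict (Int × Int × Int) Int × Int) (g : Int × Int × Int) :
    PySem.Dict (Int × Int × Int) Int × Int :=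
  let c := st.1.getD g 0
  (st.1.insert g (c + 1), st.2 + c)

def patternRepetitions_alt (text : List Int) : Int :=
  [(3 : Int), 5, 7, 11, 13].foldl (fun total step =>
    total + ((PySem.List.pyRange 0 ((text.length : Int) - 3) step).foldl
      (fun st pos =>
        pvBStep st (PySem.List.pyGetD text pos 0, PySem.List.pyGetD text (pos + 1) 0,
                    PySem.List.pyGetD text (pos + 2) 0))
      (PySem.Dict.empty, 0)).2)
    0

-- ===== PRECONDITION & SPEC =====
def Spec_patternRepetitions (text : List Int) (out : Int) : Prop := out = patternRepetitions_alt text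
instance (text : List Int) (out : Int) : Decidable (Spec_patternRepetitions text out) := by unfold Spec_patternRepetitions; infer_instance

-- ===== CLAIM (what is proved, stated in full; the proofs are below) =====
def Claim_equal_patternRepetitions : Prop := ∀ (text : List Int), Dom_patternRepetitions text → Spec_patternRepetitions text (patternRepetitions text)

-- ===== LEMMAS AND PROOFS =====

-- the 3-gram starting at position p
def pvTri (text : List Int) (p : Int) : Int × Int × Int :=
  (PySem.List.pyGetD text p 0, PySem.List.pyGetD text (p + 1) 0, PySem.List.pyGetD text (p + 2) 0)

-- A's comparison as a boolean on two positions
def pvEqb (text : List Int) (p q : Int) : Bool :=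
  PySem.List.pyGetD text p 0 == PySem.List.pyGetD text q 0 &&
  PySem.List.pyGetD text (p + 1) 0 == PySem.List.pyGetD text (q + 1) 0 &&
  PySem.List.pyGetD text (p + 2) 0 == PySem.List.pyGetD text (q + 2) 0

-- number of (earlier, later) equal-3-gram pairs over a list of positions (A's per-step total)
def pvPairsP (text : List Int) : List Int → Nat
  | [] => 0
  | p :: ps => ps.countP (pvEqb text p) + pvPairsP text ps

-- the same quantity over a list of 3-grams
def pvPairsT : List (Int × Int × Int) → Nat
  | [] => 0
  | x :: xs => xs.count x + pvPairsT xs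

-- cross pairs between a processed prefix P and a remaining list
def pvCross (P : List (Int × Int × Int)) : List (Int × Int × Int) → Nat
  | [] => 0
  | y :: ys => P.count y + pvCross P ys

lemma pvRange_nil (a b s : Int) (hs : 0 < s) (h : b ≤ a) : PySem.List.pyRange a b s = [] := by
  rw [PySem.List.pyRange_of_pos a b hs, if_neg (not_lt.mpr h)]
  simp

lemma pvRange_cons (a b s : Int) (hs : 0 < s) (h : a < b) :
    PySem.List.pyRange a b s = a :: PySem.List.pyRange (a + s) b s := by
  rw [PySem.List.pyRange_of_pos a b hs, PySem.List.pyRange_of_pos (a + s) b hs, if_pos h]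
  by_cases h2 : a + s < b
  · rw [if_pos h2]
    have hq : b - a + s - 1 = (b - (a + s) + s - 1) + 1 * s := by ring
    rw [hq, Int.add_mul_ediv_right _ _ (ne_of_gt hs)]
    have hnn : 0 ≤ (b - (a + s) + s - 1) / s := Int.ediv_nonneg (by omega) (le_of_lt hs)
    have ht : ((b - (a + s) + s - 1) / s + 1).toNat = ((b - (a + s) + s - 1) / s).toNat + 1 := by
      omega
    rw [ht, List.range_succ_eq_map, List.map_cons, List.map_map]
    congr 1
    · simp
    · apply List.map_congr_left; intro k _; simp [Function.comp]; ring
  · rw [if_neg h2]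
    have h1 : b - a + s - 1 = (b - a - 1) + 1 * s := by ring
    have hz : (b - a - 1) / s = 0 := Int.ediv_eq_zero_of_lt (by omega) (by omega)
    rw [h1, Int.add_mul_ediv_right _ _ (ne_of_gt hs), hz]
    simp


lemma pvTri_def (text : List Int) (p : Int) :
    (PySem.List.pyGetD text p 0, PySem.List.pyGetD text (p + 1) 0, PySem.List.pyGetD text (p + 2) 0)
      = pvTri text p := rfl

lemma pvEqb_eq (text : List Int) (p q : Int) :
    pvEqb text p q = (pvTri text p == pvTri text q) := by
  rw [Bool.eq_iff_iff]
  simp [pvEqb, pvTri, Prod.ext_iff, and_assoc]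

lemma pvCount_map (text : List Int) (p : Int) : ∀ ps : List Int,
    (ps.map (pvTri text)).count (pvTri text p) = ps.countP (pvEqb text p) := by
  intro ps
  induction ps with
  | nil => simp
  | cons q qs ih =>
    simp only [List.map_cons, List.count_cons, List.countP_cons, pvEqb_eq, ih]
    by_cases h : pvTri text q = pvTri text p
    · simp [h]
    · simp [h, Ne.symm h]

lemma pvPairsT_map (text : List Int) (L : List Int) :
    pvPairsT (L.map (pvTri text)) = pvPairsP text L := by
  induction L with
  | nil => simp [pvPairsT, pvPairsP]
  | cons p ps ih =>
    simp only [List.map_cons, pvPairsT, pvPairsP, ih, pvCount_map]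

lemma pvCountFold (f : Int → Bool) (L : List Int) : ∀ c0 : Int,
    L.foldl (fun c q => if f q then c + 1 else c) c0 = c0 + (L.countP f : Int) := by
  induction L with
  | nil => intro c0; simp
  | cons x xs ih =>
    intro c0
    simp only [List.foldl_cons, List.countP_cons]
    by_cases h : f x
    · simp [h, ih]; ring
    · simp [h, ih]

lemma pvA_outer (text : List Int) (s : Int) (hs : 0 < s) :
    ∀ (n : Nat) (a : Int), (((text.length : Int) - 3) - a).toNat ≤ n → ∀ (c0 : Int),
      (PySem.List.pyRange a ((text.length : Int) - 3) s).foldl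
        (fun counter position =>
          (PySem.List.pyRange (position + s) ((text.length : Int) - 3) s).foldl
            (fun counter2 position2 =>
              if PySem.List.pyGetD text position 0 == PySem.List.pyGetD text position2 0 &&
                 PySem.List.pyGetD text (position + 1) 0 == PySem.List.pyGetD text (position2 + 1) 0 &&
                 PySem.List.pyGetD text (position + 2) 0 == PySem.List.pyGetD text (position2 + 2) 0
              then counter2 + 1 else counter2)
            counter)
        c0
      = c0 + (pvPairsP text (PySem.List.pyRange a ((text.length : Int) - 3) s) : Int) := by
  intro n
  induction n with
  | zero =>
    intro a h c0
    rw [pvRange_nil _ _ _ hs (by omega)]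
    simp [pvPairsP]
  | succ n ih =>
    intro a h c0
    by_cases hab : a < (text.length : Int) - 3
    · rw [pvRange_cons _ _ _ hs hab]
      simp only [List.foldl_cons]
      rw [pvCountFold (fun position2 =>
            PySem.List.pyGetD text a 0 == PySem.List.pyGetD text position2 0 &&
            PySem.List.pyGetD text (a + 1) 0 == PySem.List.pyGetD text (position2 + 1) 0 &&
            PySem.List.pyGetD text (a + 2) 0 == PySem.List.pyGetD text (position2 + 2) 0),
          ih (a + s) (by omega)]
      have hc : (fun position2 =>
            PySem.List.pyGetD text a 0 == PySem.List.pyGetD text position2 0 &&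
            PySem.List.pyGetD text (a + 1) 0 == PySem.List.pyGetD text (position2 + 1) 0 &&
            PySem.List.pyGetD text (a + 2) 0 == PySem.List.pyGetD text (position2 + 2) 0)
          = pvEqb text a := rfl
      rw [hc]
      simp only [pvPairsP]
      push_cast
      ring
    · rw [pvRange_nil _ _ _ hs (not_lt.mp hab)]
      simp [pvPairsP]

lemma pvCross_append (x : Int × Int × Int) (P : List (Int × Int × Int)) :
    ∀ L, pvCross (P ++ [x]) L = pvCross P L + L.count x := by
  intro L
  induction L with
  | nil => simp [pvCross]
  | cons y ys ih =>
    by_cases hxy : y = x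
    · subst hxy
      simp only [pvCross, ih, List.count_append, List.count_cons]
      simp
      omega
    · simp only [pvCross, ih, List.count_append, List.count_cons]
      simp [hxy, Ne.symm hxy]
      omega

lemma pvB_run : ∀ (L P : List (Int × Int × Int)) (d : PySem.Dict (Int × Int × Int) Int) (acc : Int),
    (∀ g, d.getD g 0 = (P.count g : Int)) →
    (L.foldl pvBStep (d, acc)).2 = acc + (pvCross P L : Int) + (pvPairsT L : Int) := by
  intro L
  induction L with
  | nil => intro P d acc h; simp [pvCross, pvPairsT]
  | cons x xs ih =>
    intro P d acc h
    simp only [List.foldl_cons, pvBStep]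
    have hnew : ∀ g, (d.insert x (d.getD x 0 + 1)).getD g 0 = (((P ++ [x]).count g : Nat) : Int) := by
      intro g
      rw [PySem.Dict.getD_insert]
      by_cases hg : g = x
      · have h1 : List.count x [x] = 1 := by simp
        rw [if_pos hg, hg, h, List.count_append, h1]
        push_cast
        ring
      · rw [if_neg hg, h]
        have hz : List.count g [x] = 0 := by
          rw [List.count_eq_zero]; simp [hg]
        simp [List.count_append, hz]
    rw [ih (P ++ [x]) _ _ hnew, h x, pvCross_append]
    simp only [pvCross, pvPairsT]
    push_cast
    ring

theorem patternRepetitions_spec : Claim_equal_patternRepetitions := by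
  intro text _
  unfold Spec_patternRepetitions
  have hA : ∀ (s : Int), 0 < s → ∀ (c0 : Int),
      (PySem.List.pyRange 0 ((text.length : Int) - 3) s).foldl
        (fun counter position =>
          (PySem.List.pyRange (position + s) ((text.length : Int) - 3) s).foldl
            (fun counter2 position2 =>
              if PySem.List.pyGetD text position 0 == PySem.List.pyGetD text position2 0 &&
                 PySem.List.pyGetD text (position + 1) 0 == PySem.List.pyGetD text (position2 + 1) 0 &&
                 PySem.List.pyGetD text (position + 2) 0 == PySem.List.pyGetD text (position2 + 2) 0
              then counter2 + 1 else counter2)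
            counter)
        c0
      = c0 + (pvPairsP text (PySem.List.pyRange 0 ((text.length : Int) - 3) s) : Int) :=
    fun s hs c0 =>
      pvA_outer text s hs ((((text.length : Int) - 3) - 0).toNat) 0 (le_refl _) c0
  have hB : ∀ (s : Int),
      ((PySem.List.pyRange 0 ((text.length : Int) - 3) s).foldl
        (fun st pos => pvBStep st (pvTri text pos)) (PySem.Dict.empty, 0)).2
      = (pvPairsP text (PySem.List.pyRange 0 ((text.length : Int) - 3) s) : Int) := by
    intro s
    have hfold : ((PySem.List.pyRange 0 ((text.length : Int) - 3) s).map (pvTri text)).foldl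
        pvBStep (PySem.Dict.empty, (0 : Int))
        = (PySem.List.pyRange 0 ((text.length : Int) - 3) s).foldl
            (fun st pos => pvBStep st (pvTri text pos)) (PySem.Dict.empty, (0 : Int)) := by
      rw [List.foldl_map]
    rw [← hfold]
    rw [pvB_run _ [] _ 0 (by intro g; simp [PySem.Dict.getD_empty])]
    have hcr : ∀ L : List (Int × Int × Int), pvCross [] L = 0 := by
      intro L; induction L with
      | nil => rfl
      | cons y ys ih => simp [pvCross, ih]
    rw [hcr, pvPairsT_map]
    push_cast
    ring
  have hA3 := hA 3 (by norm_num)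
  have hA5 := hA 5 (by norm_num)
  have hA7 := hA 7 (by norm_num)
  have hA11 := hA 11 (by norm_num)
  have hA13 := hA 13 (by norm_num)
  simp only [patternRepetitions, patternRepetitions_alt, List.foldl, pvTri_def,
    hA3, hA5, hA7, hA11, hA13, hB]
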